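-- pv_equiv track=rewrite | github.com/zhu313/MTDeepM6A-2S | models_stageI/codes/predict/predict_RAC.py | getsegs
-- ===== SOURCE A (Python) =====
-- def getSubStrIndex(str1,pattern):
--     n = str1.count(pattern)
--     indexes=[]
--     if n > 0:
--         idx = str1.find(pattern)
--         while idx != -1:
--             indexes.append(idx)
--             idx = str1.find(pattern,idx+1)
--     return indexes
--
-- def getsegs(seq):
--     indexes1 = getSubStrIndex(seq,'AAC')
--     indexes2 = getSubStrIndex(seq,'GAC')
--     indexes = indexes1 + indexes2
--     n = len(indexes)
--     indexes.sort()
--     segs = []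
--     poss = []
--     for index in indexes:
--         start = max([0,index+1-300])
--         tmpseg = 'N'*(300-index-1) + seq[start:(index+1+301)] + 'N'*(index+1+301-len(seq))
--         segs.append(tmpseg)
--         poss.append(index+2)
--     return segs,poss
-- ===== SOURCE B (Python) =====
-- def getsegs(seq):
--     segs = []
--     poss = []
--     for i in range(len(seq) - 2):
--         if seq[i:i+3] in ('AAC', 'GAC'):
--             start = max(0, i + 1 - 300)
--             segs.append('N' * (300 - i - 1) + seq[start:i + 302] + 'N' * (i + 302 - len(seq)))
--             poss.append(i + 2)
--     return segs, poss
-- ===== Notes on version B (the rewrite author's own statement) =====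
-- stated objective: simpler
-- what changed: Replaces the two separate str.find scans, list concatenation and sort with a single left-to-right pass that tests seq[i:i+3] against ('AAC','GAC') and builds each window on the spot, so the match positions come out in ascending order and no sort is needed.
import Mathlib
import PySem

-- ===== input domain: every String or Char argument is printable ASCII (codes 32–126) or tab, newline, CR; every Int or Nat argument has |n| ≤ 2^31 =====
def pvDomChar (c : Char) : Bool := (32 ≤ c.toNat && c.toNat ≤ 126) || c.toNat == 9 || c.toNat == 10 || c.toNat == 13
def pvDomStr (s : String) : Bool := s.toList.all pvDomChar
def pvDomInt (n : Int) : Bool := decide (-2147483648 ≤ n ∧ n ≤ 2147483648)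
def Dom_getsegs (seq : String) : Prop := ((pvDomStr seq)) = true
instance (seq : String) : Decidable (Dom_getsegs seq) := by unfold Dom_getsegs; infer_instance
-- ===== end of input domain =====

-- B replaces A's two str.find scans plus concatenate-and-sort by one linear scan that tests seq[i:i+3]
-- at every position and collects the matches, which are already in ascending order, so no sort is needed
-- (objective: simpler — one pass, no sort).

-- ===== PORT A =====
-- the window-building expression of A's loop body: 'N'*(300-index-1) + seq[start:index+1+301] + 'N'*(index+1+301-len(seq))
def mksegA (seq : String) (index : Int) : String :=
  let start : Int := max 0 (index + 1 - 300)
  String.ofList (PySem.List.pyRepeat ['N'] (300 - index - 1)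
    ++ (PySem.Str.slice seq (some start) (some (index + 1 + 301))).toList
    ++ PySem.List.pyRepeat ['N'] (index + 1 + 301 - PySem.Str.len seq))

-- the 'while idx != -1' loop of getSubStrIndex; the fuel (length+1, enough for every match) only makes the same loop total
def findLoop (str1 pattern : String) : Nat → Int → List Int → List Int
  | 0, _, acc => acc
  | fuel + 1, idx, acc =>
      if idx ≠ -1 then
        findLoop str1 pattern fuel (PySem.Str.findFrom str1 pattern (idx + 1)) (acc ++ [idx])
      else acc

def getSubStrIndex (str1 pattern : String) : List Int :=
  let n := PySem.Str.count str1 pattern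
  if n > 0 then
    findLoop str1 pattern (str1.toList.length + 1) (PySem.Str.find str1 pattern) []
  else []

def getsegs (seq : String) : List String × List Int :=
  let indexes1 := getSubStrIndex seq "AAC"
  let indexes2 := getSubStrIndex seq "GAC"
  let indexes := PySem.List.sorted (indexes1 ++ indexes2) (fun x => x)
  indexes.foldl (fun acc index => (acc.1 ++ [mksegA seq index], acc.2 ++ [index + 2])) ([], [])

-- ===== PORT B =====
-- the window-building expression of B's loop body: 'N'*(300-i-1) + seq[start:i+302] + 'N'*(i+302-len(seq))
def mksegB (seq : String) (i : Int) : String :=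
  let start : Int := max 0 (i + 1 - 300)
  String.ofList (PySem.List.pyRepeat ['N'] (300 - i - 1)
    ++ (PySem.Str.slice seq (some start) (some (i + 302))).toList
    ++ PySem.List.pyRepeat ['N'] (i + 302 - PySem.Str.len seq))

def getsegs_alt (seq : String) : List String × List Int :=
  (PySem.List.pyRange 0 (PySem.Str.len seq - 2) 1).foldl
    (fun acc i =>
      if PySem.Str.slice seq (some i) (some (i + 3)) ∈ (["AAC", "GAC"] : List String) then
        (acc.1 ++ [mksegB seq i], acc.2 ++ [i + 2])
      else acc)
    ([], [])

-- ===== PRECONDITION & SPEC =====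
def Spec_getsegs (seq : String) (out : List String × List Int) : Prop := out = getsegs_alt seq
instance (seq : String) (out : List String × List Int) : Decidable (Spec_getsegs seq out) := by unfold Spec_getsegs; infer_instance

-- ===== CLAIM (what is proved, stated in full; the proofs are below) =====
def Claim_equal_getsegs : Prop := ∀ (seq : String), Dom_getsegs seq → Spec_getsegs seq (getsegs seq)

-- ===== LEMMAS AND PROOFS =====

-- the positions at which pattern p occurs in s, in ascending order
def occ (s p : List Char) : List Nat :=
  (List.range s.length).filter (fun i => p.isPrefixOf (s.drop i))

lemma occ_pairwise (s p : List Char) : (occ s p).Pairwise (· < ·) :=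
  List.Pairwise.sublist List.filter_sublist List.pairwise_lt_range

lemma mem_occ {s p : List Char} (hp : p ≠ []) {i : Nat} :
    i ∈ occ s p ↔ p <+: s.drop i := by
  unfold occ
  simp only [List.mem_filter, List.mem_range, List.isPrefixOf_iff_prefix]
  constructor
  · exact fun h => h.2
  · intro h
    refine ⟨?_, h⟩
    by_contra hi
    push_neg at hi
    rw [List.drop_eq_nil_of_le hi] at h
    exact hp (List.prefix_nil.mp h)

lemma prefix_drop_infix {s p : List Char} {k i : Nat} (hk : k ≤ i) (h : p <+: s.drop i) :
    p <:+: s.drop k := by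
  have : s.drop i = (s.drop k).drop (i - k) := by rw [List.drop_drop]; congr 1; omega
  rw [this] at h
  exact h.isInfix.trans (List.drop_suffix _ _).isInfix

lemma count_go_mono (sub : List Char) : ∀ (fuel : Nat) (l : List Char) (acc : Nat),
    acc ≤ PySem.Chars.count.go sub fuel l acc := by
  intro fuel
  induction fuel with
  | zero => intro l acc; simp [PySem.Chars.count.go]
  | succ n ih =>
    intro l acc
    cases l with
    | nil => simp [PySem.Chars.count.go]
    | cons h t =>
      rw [PySem.Chars.count.go]
      split
      · exact le_trans (Nat.le_succ acc) (ih _ _)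
      · exact ih _ _

lemma count_go_pos (sub : List Char) (hsub : sub ≠ []) :
    ∀ (fuel : Nat) (l : List Char) (acc : Nat), l.length ≤ fuel → sub <:+: l →
    0 < PySem.Chars.count.go sub fuel l acc := by
  intro fuel
  induction fuel with
  | zero =>
    intro l acc hl hinf
    interval_cases h : l.length
    · rw [List.length_eq_zero_iff] at h; subst h
      exact absurd (List.eq_nil_of_infix_nil hinf) hsub
  | succ n ih =>
    intro l acc hl hinf
    cases l with
    | nil => exact absurd (List.eq_nil_of_infix_nil hinf) hsub
    | cons h t =>
      rw [PySem.Chars.count.go]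
      split
      · exact lt_of_lt_of_le (Nat.succ_pos acc) (count_go_mono _ _ _ _)
      · next hnp =>
        have : sub <:+: t := by
          rcases (List.infix_cons_iff).mp hinf with hpre | hsuf
          · exact absurd (by simpa using hpre) (by simpa using hnp)
          · exact hsuf
        exact ih t acc (by simpa using Nat.le_of_succ_le_succ (by simpa using hl)) this

lemma count_pos_of_infix {s sub : List Char} (hsub : sub ≠ []) (h : sub <:+: s) :
    0 < PySem.Chars.count s sub := by
  unfold PySem.Chars.count
  rw [if_neg (by simpa using hsub)]
  exact count_go_pos sub hsub s.length s 0 le_rfl h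

lemma filter_ge_eq_cons {m : Nat} : ∀ {l : List Nat}, l.Pairwise (· < ·) → m ∈ l →
    l.filter (fun i => m ≤ i) = m :: l.filter (fun i => m + 1 ≤ i) := by
  intro l
  induction l with
  | nil => simp
  | cons x t ih =>
    intro hp hm
    have hpt := (List.pairwise_cons.mp hp).2
    have hxt := (List.pairwise_cons.mp hp).1
    rcases List.mem_cons.mp hm with rfl | hmt
    · simp only [List.filter_cons, decide_eq_true_eq]
      rw [if_pos (le_refl m), if_neg (by omega)]
      congr 1
      apply List.filter_congr
      intro a ha
      have := hxt a ha
      have h1 : m ≤ a := by omega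
      have h2 : m + 1 ≤ a := by omega
      simp [h1, h2]
    · have hxm : x < m := hxt m hmt
      simp only [List.filter_cons, decide_eq_true_eq]
      rw [if_neg (by omega), if_neg (by omega)]
      exact ih hpt hmt

lemma findLoop_spec (s p : String) (hp : p.toList ≠ []) :
    ∀ (fuel k : Nat) (acc : List Int), k ≤ s.toList.length → s.toList.length + 1 - k ≤ fuel →
    findLoop s p fuel (PySem.Chars.findFrom s.toList p.toList (k : Int)) acc
      = acc ++ ((occ s.toList p.toList).filter (fun i => k ≤ i)).map (fun i => Int.ofNat i) := by
  intro fuel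
  induction fuel with
  | zero => intro k acc hk hf; omega
  | succ n ih =>
    intro k acc hk hf
    by_cases hm : PySem.Chars.findFrom s.toList p.toList (k : Int) = -1
    · rw [findLoop, if_neg (by simpa using hm), List.self_eq_append_right]
      rw [PySem.Chars.findFrom_natCast_eq_neg_one_iff s.toList p.toList k hk] at hm
      have hfil : (occ s.toList p.toList).filter (fun i => k ≤ i) = [] := by
        rw [List.filter_eq_nil_iff]
        intro i hi hki
        exact hm (prefix_drop_infix (by simpa using hki) ((mem_occ hp).mp hi))
      rw [hfil, List.map_nil]
    · obtain ⟨hkm, hpre, hmin⟩ := PySem.Chars.findFrom_natCast_spec s.toList p.toList k hk hm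
      set m := PySem.Chars.findFrom s.toList p.toList (k : Int) with hmdef
      have hm0 : 0 ≤ m := le_trans (by positivity) hkm
      have hmlt : m.toNat < s.toList.length := by
        have h1 : p.toList.length ≤ (s.toList.drop m.toNat).length := hpre.length_le
        rw [List.length_drop] at h1
        have : 0 < p.toList.length := List.length_pos_iff.mpr hp
        omega
      rw [findLoop, if_pos (by simpa using hm)]
      have hcast : m + 1 = ((m.toNat + 1 : Nat) : Int) := by omega
      rw [PySem.Str.findFrom_eq, hcast, ih (m.toNat + 1) (acc ++ [m]) (by omega) (by omega)]
      rw [List.append_assoc]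
      congr 1
      have hmem : m.toNat ∈ occ s.toList p.toList := (mem_occ hp).mpr hpre
      have step1 : (occ s.toList p.toList).filter (fun i => k ≤ i)
          = (occ s.toList p.toList).filter (fun i => m.toNat ≤ i) := by
        apply List.filter_congr
        intro a ha
        by_cases hka : k ≤ a
        · have : ¬ (a < m.toNat) := fun hlt => hmin a hka hlt ((mem_occ hp).mp ha)
          have h1 : m.toNat ≤ a := by omega
          simp [hka, h1]
        · have h2 : ¬ m.toNat ≤ a := by omega
          simp [hka, h2]
      rw [step1, filter_ge_eq_cons (occ_pairwise _ _) hmem]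
      have hcast2 : ((m.toNat : Int)) = m := by omega
      simp [hcast2]

lemma getSubStrIndex_eq (s p : String) (hp : p.toList ≠ []) :
    getSubStrIndex s p = (occ s.toList p.toList).map (fun i => Int.ofNat i) := by
  unfold getSubStrIndex
  by_cases hc : 0 < PySem.Str.count s p
  · rw [if_pos (by simpa using hc)]
    have h0 : PySem.Str.find s p = PySem.Chars.findFrom s.toList p.toList ((0 : Nat) : Int) := by
      simp [PySem.Chars.findFrom_zero]
    rw [h0, findLoop_spec s p hp (s.toList.length + 1) 0 [] (by omega) (by omega)]
    simp
  · rw [if_neg (by simpa using hc)]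
    have hocc : occ s.toList p.toList = [] := by
      by_contra hne
      obtain ⟨i, hi⟩ := List.exists_mem_of_ne_nil _ hne
      have hpre := (mem_occ hp).mp hi
      have hinf : p.toList <:+: s.toList := by
        have := prefix_drop_infix (Nat.zero_le i) hpre
        simpa using this
      have := count_pos_of_infix hp hinf
      rw [PySem.Str.count_eq] at hc
      omega
    rw [hocc, List.map_nil]

lemma filter_or_perm {α : Type} (p q : α → Bool) (h : ∀ x, ¬(p x = true ∧ q x = true)) :
    ∀ l : List α, (l.filter p ++ l.filter q).Perm (l.filter (fun x => p x || q x)) := by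
  intro l
  induction l with
  | nil => simp
  | cons x t ih =>
    simp only [List.filter_cons]
    by_cases hp : p x = true
    · have hq : q x = false := by
        cases hqv : q x
        · rfl
        · exact absurd ⟨hp, hqv⟩ (h x)
      simp only [hp, hq, if_true, Bool.true_or, Bool.false_eq_true, if_false, List.cons_append]
      exact ih.cons x
    · have hp' : p x = false := by simpa using hp
      by_cases hq : q x = true
      · simp only [hp', hq, if_true, if_false]
        exact (List.perm_middle).trans (ih.cons x)
      · have hq' : q x = false := by simpa using hq
        simp only [hp', hq', if_false]
        exact ih

lemma slice_toList (seq : String) (i : Nat) :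
    (PySem.Str.slice seq (some (Int.ofNat i)) (some (Int.ofNat i + 3))).toList
      = (seq.toList.drop i).take 3 := by
  have h3 : (Int.ofNat i) + 3 = ((i + 3 : Nat) : Int) := by simp [Int.ofNat_eq_natCast]
  have h4 : (Int.ofNat i) = ((i : Nat) : Int) := by simp [Int.ofNat_eq_natCast]
  rw [h3, h4, PySem.Str.toList_slice, PySem.Chars.slice_eq_listSlice, PySem.List.slice_natCast]
  norm_num

lemma string_eq_iff (s t : String) : s = t ↔ s.toList = t.toList :=
  ⟨fun h => by rw [h], fun h => String.toList_injective h⟩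

lemma test_eq (seq : String) (i : Nat) :
    (decide (PySem.Str.slice seq (some (Int.ofNat i)) (some (Int.ofNat i + 3)) ∈ (["AAC", "GAC"] : List String)))
      = ((("AAC":String).toList.isPrefixOf (seq.toList.drop i)) || (("GAC":String).toList.isPrefixOf (seq.toList.drop i))) := by
  rw [Bool.eq_iff_iff]
  simp only [decide_eq_true_eq, Bool.or_eq_true, List.isPrefixOf_iff_prefix,
    List.mem_cons, List.not_mem_nil, or_false]
  rw [string_eq_iff _ "AAC", string_eq_iff _ "GAC", slice_toList]
  have hA : ("AAC":String).toList = ['A','A','C'] := by decide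
  have hG : ("GAC":String).toList = ['G','A','C'] := by decide
  have key : ∀ (p t : List Char), p.length = 3 → ((t.take 3 = p) ↔ p <+: t) := by
    intro p t hp
    rw [List.prefix_iff_eq_take, hp, eq_comm]
  rw [hA, hG, key _ _ (by decide), key _ _ (by decide)]

lemma no_match_close (seq : String) (p : List Char) (hp : p.length = 3) (i : Nat)
    (hi : seq.toList.length ≤ i + 2) : ¬ p.isPrefixOf (seq.toList.drop i) := by
  intro h
  rw [List.isPrefixOf_iff_prefix] at h
  have := h.length_le
  rw [List.length_drop] at this
  omega

lemma main_indexes (seq : String) :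
    PySem.List.sorted (getSubStrIndex seq "AAC" ++ getSubStrIndex seq "GAC") (fun x => x)
      = (PySem.List.pyRange 0 (PySem.Str.len seq - 2) 1).filter
          (fun i => decide (PySem.Str.slice seq (some i) (some (i + 3)) ∈ (["AAC", "GAC"] : List String))) := by
  have hA : ("AAC":String).toList ≠ [] := by decide
  have hG : ("GAC":String).toList ≠ [] := by decide
  set sl := seq.toList with hsl
  set L := sl.length with hL
  set pA : Nat → Bool := fun i => ("AAC":String).toList.isPrefixOf (sl.drop i) with hpA
  set pG : Nat → Bool := fun i => ("GAC":String).toList.isPrefixOf (sl.drop i) with hpG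
  have hdisj : ∀ i, ¬ (pA i = true ∧ pG i = true) := by
    rintro i ⟨h1, h2⟩
    rw [hpA] at h1; rw [hpG] at h2
    simp only [List.isPrefixOf_iff_prefix] at h1 h2
    have hlen : (("AAC":String).toList).length ≤ (("GAC":String).toList).length := by decide
    have := (List.prefix_of_prefix_length_le h1 h2 hlen).eq_of_length (by decide)
    exact absurd this (by decide)
  have hlen : PySem.Str.len seq = (L : Int) := PySem.Str.len_eq seq
  have hm : ((L : Int) - 2).toNat = L - 2 := by omega
  have hRHS : (PySem.List.pyRange 0 (PySem.Str.len seq - 2) 1).filter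
          (fun i => decide (PySem.Str.slice seq (some i) (some (i + 3)) ∈ (["AAC", "GAC"] : List String)))
      = ((List.range (L - 2)).filter (fun i => pA i || pG i)).map (fun i => Int.ofNat i) := by
    rw [hlen, PySem.List.pyRange_one, Int.sub_zero, hm]
    have hmap : (List.range (L-2)).map (fun k : Nat => (0 : Int) + (k : Int))
        = (List.range (L-2)).map (fun k : Nat => Int.ofNat k) := by
      apply List.map_congr_left; intro a _; simp [Int.ofNat_eq_natCast]
    rw [hmap, List.filter_map]
    congr 1
    apply List.filter_congr
    intro a _
    exact test_eq seq a
  rw [hRHS]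
  rw [getSubStrIndex_eq seq "AAC" hA, getSubStrIndex_eq seq "GAC" hG]
  apply PySem.List.sorted_eq_of_perm_of_pairwise_lt
  · -- the merged occurrence lists are a permutation of the single-pass filter
    have hsplit : List.range L = List.range (L - 2) ++ (List.range (L - (L-2))).map (fun x => (L-2) + x) := by
      have : L = (L - 2) + (L - (L-2)) := by omega
      calc List.range L = List.range ((L - 2) + (L - (L-2))) := by rw [← this]
        _ = _ := List.range_add
    have hocc : ∀ (pb : Nat → Bool), (∀ i, L ≤ i + 2 → pb i = false) →
        (List.range L).filter pb = (List.range (L-2)).filter pb := by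
      intro pb hfar
      rw [hsplit, List.filter_append]
      have h2 : ((List.range (L - (L-2))).map (fun x => (L-2) + x)).filter pb = [] := by
        rw [List.filter_eq_nil_iff]
        intro a ha
        simp only [List.mem_map, List.mem_range] at ha
        obtain ⟨x, _, rfl⟩ := ha
        rw [hfar ((L-2) + x) (by omega)]
        simp
      rw [h2, List.append_nil]
    have e1 : occ sl ("AAC":String).toList = (List.range (L-2)).filter pA := by
      show (List.range L).filter pA = _
      exact hocc pA (fun i hi => by
        simpa [hpA] using (Bool.eq_false_iff.mpr (fun hb => no_match_close seq ("AAC":String).toList (by decide) i hi (by simpa [hpA] using hb))))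
    have e2 : occ sl ("GAC":String).toList = (List.range (L-2)).filter pG := by
      show (List.range L).filter pG = _
      exact hocc pG (fun i hi => by
        simpa [hpG] using (Bool.eq_false_iff.mpr (fun hb => no_match_close seq ("GAC":String).toList (by decide) i hi (by simpa [hpG] using hb))))
    rw [e1, e2, ← List.map_append]
    exact ((filter_or_perm pA pG hdisj (List.range (L-2))).symm).map _
  · -- the single-pass filter is strictly increasing
    have hpw : ((List.range (L-2)).filter (fun i => pA i || pG i)).Pairwise (· < ·) :=
      List.Pairwise.sublist List.filter_sublist List.pairwise_lt_range
    exact hpw.map _ (fun a b h => by simpa [Int.ofNat_eq_natCast] using Int.ofNat_lt.mpr h)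

lemma mksegB_eq (seq : String) (i : Int) : mksegB seq i = mksegA seq i := by
  unfold mksegA mksegB
  have h : i + 1 + 301 = i + 302 := by ring
  rw [h]

lemma getsegs_eq_alt (seq : String) : getsegs seq = getsegs_alt seq := by
  unfold getsegs getsegs_alt
  rw [PySem.List.foldl_prod_mk (f := fun l index => l ++ [mksegA seq index])
        (g := fun l index => l ++ [index + 2])]
  rw [PySem.List.foldl_congr_mem _ _
      (fun acc i => (if PySem.Str.slice seq (some i) (some (i + 3)) ∈ (["AAC", "GAC"] : List String) then acc.1 ++ [mksegB seq i] else acc.1,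
                     if PySem.Str.slice seq (some i) (some (i + 3)) ∈ (["AAC", "GAC"] : List String) then acc.2 ++ [i + 2] else acc.2))
      _ (by
        intro acc x _
        by_cases hx : PySem.Str.slice seq (some x) (some (x + 3)) ∈ (["AAC", "GAC"] : List String)
        · simp [hx]
        · simp [hx])]
  rw [PySem.List.foldl_prod_mk
      (f := fun acc i => if PySem.Str.slice seq (some i) (some (i + 3)) ∈ (["AAC", "GAC"] : List String) then acc ++ [mksegB seq i] else acc)
      (g := fun acc i => if PySem.Str.slice seq (some i) (some (i + 3)) ∈ (["AAC", "GAC"] : List String) then acc ++ [i + 2] else acc)]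
  rw [PySem.List.foldl_append_singleton_eq_map, PySem.List.foldl_append_singleton_eq_map]
  rw [PySem.List.foldl_append_ite (p := fun i => PySem.Str.slice seq (some i) (some (i + 3)) ∈ (["AAC", "GAC"] : List String)) (f := fun i => mksegB seq i)]
  rw [PySem.List.foldl_append_ite (p := fun i => PySem.Str.slice seq (some i) (some (i + 3)) ∈ (["AAC", "GAC"] : List String)) (f := fun i => i + 2)]
  rw [main_indexes seq]
  simp only [List.nil_append]
  have hfn : (fun i => mksegB seq i) = mksegA seq := funext (fun i => mksegB_eq seq i)
  rw [hfn]

-- ===== VERDICT (by name: the statement is the Claim_ definition above) =====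
theorem getsegs_spec : Claim_equal_getsegs := by
  intro seq _
  unfold Spec_getsegs
  exact getsegs_eq_alt seq
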